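-- pv_equiv track=rewrite | github.com/muleyashutosh/Codechef-CodeBase | DSA_Learning_Series/Contest_1/LAPIN.py | is_lapindrome
-- ===== SOURCE A (Python) =====
-- from collections import defaultdict
--
-- def is_lapindrome(s):
--     left = defaultdict(lambda: 0)
--     right = defaultdict(lambda: 0)
--     if len(s) % 2:
--         lm = len(s) // 2
--         rm = lm + 1
--     else:
--         lm = len(s) // 2
--         rm = lm
--     for x in range(lm):
--         left[s[x]] += 1
--     for x in range(rm, len(s)):
--         right[s[x]] += 1
--     return left == right
-- ===== SOURCE B (Python) =====
-- def is_lapindrome(s):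
--     lm = len(s) // 2
--     rm = lm + (len(s) % 2)
--     return sorted(s[:lm]) == sorted(s[rm:])
-- ===== Notes on version B (the rewrite author's own statement) =====
-- stated objective: simpler
-- what changed: Replaces the two hand-built frequency dictionaries and dict comparison with slicing the two halves and comparing their sorted character sequences.
import Mathlib
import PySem

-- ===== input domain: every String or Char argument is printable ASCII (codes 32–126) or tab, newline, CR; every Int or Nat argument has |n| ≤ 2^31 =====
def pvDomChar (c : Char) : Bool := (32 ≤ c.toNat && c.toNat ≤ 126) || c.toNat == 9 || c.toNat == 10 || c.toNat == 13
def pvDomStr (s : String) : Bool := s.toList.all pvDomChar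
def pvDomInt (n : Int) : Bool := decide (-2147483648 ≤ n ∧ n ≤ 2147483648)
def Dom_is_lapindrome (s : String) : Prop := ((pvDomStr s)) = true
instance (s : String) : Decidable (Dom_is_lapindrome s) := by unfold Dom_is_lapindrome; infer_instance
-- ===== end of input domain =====

-- B replaces A's two frequency dictionaries with sorting the two halves and comparing: simpler, not faster.

-- ===== PORT A =====
-- Python dict equality (== on dicts ignores insertion order): same size and every item of the left found in the right.
def pyDictEq (l r : PySem.Dict Char Int) : Bool :=
  l.size == r.size && l.items.all (fun p => r.get? p.1 == some p.2)

def is_lapindrome (s : String) : Bool :=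
  let cs := s.toList
  let n : Int := PySem.List.len cs
  let lmrm : Int × Int :=
    if PySem.Int.mod n 2 ≠ 0 then (PySem.Int.floordiv n 2, PySem.Int.floordiv n 2 + 1)
    else (PySem.Int.floordiv n 2, PySem.Int.floordiv n 2)
  -- s[x] is always in range here; pyGetD's default only makes the lookup total
  let left := (PySem.List.pyRange 0 lmrm.1).foldl
    (fun d x => d.modify (PySem.List.pyGetD cs x ' ') 0 (· + 1)) PySem.Dict.empty
  let right := (PySem.List.pyRange lmrm.2 n).foldl
    (fun d x => d.modify (PySem.List.pyGetD cs x ' ') 0 (· + 1)) PySem.Dict.empty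
  pyDictEq left right

-- ===== PORT B =====
def is_lapindrome_alt (s : String) : Bool :=
  let cs := s.toList
  let lm : Int := PySem.Int.floordiv (PySem.List.len cs) 2
  let rm : Int := lm + PySem.Int.mod (PySem.List.len cs) 2
  decide (PySem.List.sorted (PySem.List.slice cs none (some lm)) (fun x => x)
        = PySem.List.sorted (PySem.List.slice cs (some rm) none) (fun x => x))

-- ===== PRECONDITION & SPEC =====
def Spec_is_lapindrome (s : String) (out : Bool) : Prop := out = is_lapindrome_alt s
instance (s : String) (out : Bool) : Decidable (Spec_is_lapindrome s out) := by unfold Spec_is_lapindrome; infer_instance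

-- ===== CLAIM (what is proved, stated in full; the proofs are below) =====
def Claim_equal_is_lapindrome : Prop := ∀ (s : String), Dom_is_lapindrome s → Spec_is_lapindrome s (is_lapindrome s)

-- ===== LEMMAS AND PROOFS =====

-- reading consecutive indices a..b of xs yields the segment (xs.take b).drop a
theorem map_pyGetD_pyRange_seg {α : Type} (xs : List α) (d : α) (a b : Nat)
    (hb : b ≤ xs.length) :
    (PySem.List.pyRange (a : Int) (b : Int)).map (fun j => PySem.List.pyGetD xs j d)
      = (xs.take b).drop a := by
  by_cases hab : a < b
  · have hlt : ((a : Int)) < (b : Int) := by exact_mod_cast hab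
    rw [PySem.List.pyRange_one_cons hlt, List.map_cons]
    have ha1 : ((a : Int) + 1) = ((a + 1 : Nat) : Int) := by push_cast; ring
    rw [ha1, map_pyGetD_pyRange_seg xs d (a + 1) b hb]
    have haxs : a < xs.length := lt_of_lt_of_le hab hb
    rw [PySem.List.pyGetD_eq_getElem xs d (by positivity) (by exact_mod_cast haxs)]
    have htk : a < (xs.take b).length := by simp [List.length_take]; omega
    rw [List.drop_eq_getElem_cons htk]
    congr 1
    · simp [List.getElem_take]
  · have hle : (b : Int) ≤ (a : Int) := by exact_mod_cast Nat.le_of_not_lt hab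
    have : PySem.List.pyRange (a : Int) (b : Int) = [] := by
      simp [PySem.List.pyRange]; omega
    rw [this, List.map_nil]
    rw [List.drop_eq_nil_iff.mpr]
    simp [List.length_take]; omega
termination_by b - a

-- a foldl counting loop over a list of keys is Counter of that list
theorem foldl_modify_eq_counter (l : List Char) :
    l.foldl (fun d x => d.modify x 0 (· + 1)) PySem.Dict.empty = PySem.Dict.counter l := rfl

theorem pyDictEq_counter_iff (L R : List Char) :
    pyDictEq (PySem.Dict.counter L) (PySem.Dict.counter R) = true ↔ L.Perm R := by
  have hszL : (PySem.Dict.counter L).size = (PySem.Set.ofList L).length := by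
    show (PySem.Dict.counter L).items.length = _
    rw [PySem.Dict.items_counter]; simp
  have hszR : (PySem.Dict.counter R).size = (PySem.Set.ofList R).length := by
    show (PySem.Dict.counter R).items.length = _
    rw [PySem.Dict.items_counter]; simp
  have hget : ∀ (X : List Char) (k : Char) (v : Int),
      (PySem.Dict.counter X).get? k = some v ↔ (k ∈ X ∧ v = (X.count k : Int)) := by
    intro X k v
    rw [PySem.Dict.get?_eq_some_iff_mem_items _ _ _ (PySem.Dict.nodup_keys_counter X),
        PySem.Dict.items_counter]
    constructor
    · intro h
      obtain ⟨c, hc, hkv⟩ := List.mem_map.mp h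
      have h1 : c = k := congrArg Prod.fst hkv
      have h2 : (X.count c : Int) = v := congrArg Prod.snd hkv
      subst h1
      exact ⟨(PySem.Set.mem_ofList X c).mp hc, h2.symm⟩
    · rintro ⟨hk, hv⟩
      exact List.mem_map.mpr ⟨k, (PySem.Set.mem_ofList X k).mpr hk, by rw [hv]⟩
  unfold pyDictEq
  rw [Bool.and_eq_true, beq_iff_eq, List.all_eq_true]
  rw [hszL, hszR]
  constructor
  · rintro ⟨hsz, hall⟩
    have hmem : ∀ k ∈ L, k ∈ R ∧ L.count k = R.count k := by
      intro k hk
      have hitem : (k, (L.count k : Int)) ∈ (PySem.Dict.counter L).items := by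
        rw [PySem.Dict.items_counter]
        exact List.mem_map.mpr ⟨k, (PySem.Set.mem_ofList L k).mpr hk, rfl⟩
      have hthis := hall _ hitem
      dsimp only at hthis
      rw [beq_iff_eq] at hthis
      obtain ⟨hkR, hcnt⟩ := (hget R k _).mp hthis
      exact ⟨hkR, by exact_mod_cast hcnt⟩
    have hsub : PySem.Set.ofList L ⊆ PySem.Set.ofList R := by
      intro c hc
      exact (PySem.Set.mem_ofList R c).mpr
        (hmem c ((PySem.Set.mem_ofList L c).mp hc)).1
    have hperm : (PySem.Set.ofList L).Perm (PySem.Set.ofList R) :=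
      (List.subperm_of_subset (PySem.Set.nodup_ofList L) hsub).perm_of_length_le
        (le_of_eq hsz.symm)
    rw [List.perm_iff_count]
    intro c
    by_cases hc : c ∈ L
    · exact (hmem c hc).2
    · have hcR : c ∉ R := fun hcR => hc <| (PySem.Set.mem_ofList L c).mp <|
        hperm.mem_iff.mpr <| (PySem.Set.mem_ofList R c).mpr hcR
      rw [List.count_eq_zero.mpr hc, List.count_eq_zero.mpr hcR]
  · intro hperm
    have hcount := List.perm_iff_count.mp hperm
    have hmemiff : ∀ c, c ∈ L ↔ c ∈ R := fun c => hperm.mem_iff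
    constructor
    · have : (PySem.Set.ofList L).Perm (PySem.Set.ofList R) :=
        (List.perm_ext_iff_of_nodup (PySem.Set.nodup_ofList L)
          (PySem.Set.nodup_ofList R)).mpr (fun c => by
            rw [PySem.Set.mem_ofList, PySem.Set.mem_ofList]; exact hmemiff c)
      exact this.length_eq
    · intro p hp
      rw [PySem.Dict.items_counter] at hp
      obtain ⟨c, hc, hkv⟩ := List.mem_map.mp hp
      rw [← hkv]
      dsimp only
      rw [beq_iff_eq]
      exact (hget R c _).mpr ⟨(hmemiff c).mp ((PySem.Set.mem_ofList L c).mp hc),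
        by rw [hcount c]⟩

-- ===== VERDICT (by name: the statement is the Claim_ definition above) =====
theorem is_lapindrome_spec : Claim_equal_is_lapindrome := by
  intro s _
  unfold Spec_is_lapindrome is_lapindrome is_lapindrome_alt
  simp only [PySem.List.len]
  generalize s.toList = cs
  have hfd : PySem.Int.floordiv (cs.length : Int) 2 = ((cs.length / 2 : Nat) : Int) := by
    exact_mod_cast PySem.Int.floordiv_natCast cs.length 2
  have hmd : PySem.Int.mod (cs.length : Int) 2 = ((cs.length % 2 : Nat) : Int) := by
    exact_mod_cast PySem.Int.mod_natCast cs.length 2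
  have hseg1 : (PySem.List.pyRange (0 : Int) ((cs.length / 2 : Nat) : Int)).map
      (fun j => PySem.List.pyGetD cs j ' ') = cs.take (cs.length / 2) := by
    have := map_pyGetD_pyRange_seg cs ' ' 0 (cs.length / 2) (Nat.div_le_self _ 2)
    push_cast at this
    simpa using this
  have hseg2 : (PySem.List.pyRange ((cs.length / 2 + cs.length % 2 : Nat) : Int)
      ((cs.length : Nat) : Int)).map
      (fun j => PySem.List.pyGetD cs j ' ') = cs.drop (cs.length / 2 + cs.length % 2) := by
    have := map_pyGetD_pyRange_seg cs ' ' (cs.length / 2 + cs.length % 2) cs.length le_rfl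
    simpa using this
  set L := cs.take (cs.length / 2) with hL
  set R := cs.drop (cs.length / 2 + cs.length % 2) with hR
  have hloop : ∀ (a b : Int) (seg : List Char),
      (PySem.List.pyRange a b).map (fun j => PySem.List.pyGetD cs j ' ') = seg →
      (PySem.List.pyRange a b).foldl
        (fun d x => d.modify (PySem.List.pyGetD cs x ' ') 0 (· + 1)) PySem.Dict.empty
        = PySem.Dict.counter seg := by
    intro a b seg hseg
    rw [← hseg, ← foldl_modify_eq_counter, List.foldl_map]
  have hbranch : (if PySem.Int.mod (cs.length : Int) 2 ≠ 0 then
        (PySem.Int.floordiv (cs.length : Int) 2, PySem.Int.floordiv (cs.length : Int) 2 + 1)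
      else (PySem.Int.floordiv (cs.length : Int) 2, PySem.Int.floordiv (cs.length : Int) 2))
      = (((cs.length / 2 : Nat) : Int), ((cs.length / 2 + cs.length % 2 : Nat) : Int)) := by
    rw [hfd, hmd]
    by_cases hpar : cs.length % 2 = 0
    · simp [hpar]
    · have h1 : cs.length % 2 = 1 := Nat.mod_two_eq_zero_or_one _ |>.resolve_left hpar
      rw [h1]
      norm_num
  rw [hbranch]
  dsimp only
  rw [hloop _ _ L hseg1, hloop _ _ R hseg2]
  have hsl1 : PySem.List.slice cs none (some (PySem.Int.floordiv (cs.length : Int) 2)) = L := by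
    rw [hfd, PySem.List.slice_to cs (by positivity)]
    simp [hL]
    omega
  have hsl2 : PySem.List.slice cs
      (some (PySem.Int.floordiv (cs.length : Int) 2 + PySem.Int.mod (cs.length : Int) 2)) none = R := by
    rw [hfd, hmd, show ((cs.length / 2 : Nat) : Int) + ((cs.length % 2 : Nat) : Int)
          = ((cs.length / 2 + cs.length % 2 : Nat) : Int) by push_cast; ring,
        PySem.List.slice_from cs (by positivity)]
    simp [hR]
    omega
  simp only [hsl1, hsl2]
  have hiffA := pyDictEq_counter_iff L R
  have hiffB := PySem.List.sorted_id_eq_sorted_id_iff_perm L R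
  by_cases hp : L.Perm R
  · rw [hiffA.mpr hp, decide_eq_true (hiffB.mpr hp)]
  · rw [Bool.eq_iff_iff]
    simp [hiffA, hiffB, hp]
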